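-- pv_equiv track=rewrite | github.com/bmpasini/coding-challenges | hacker-rank/fibonacci-modified.py | _fib_modified
-- ===== SOURCE A (Python) =====
-- def _fib_modified(a, b, n, cache):
--     if n == 0:
--         return a
--     if n == 1:
--         return b
--     if cache[n] is None:
--         cache[n] = _fib_modified(a, b, n-1, cache) ** 2 + _fib_modified(a, b, n-2, cache)
--     return cache[n]
-- ===== SOURCE B (Python) =====
-- def _fib_modified(a, b, n, cache):
--     if n == 0:
--         return a
--     if n == 1:
--         return b
--
--     def g(j):
--         if j == 0:
--             return a
--         if j == 1:
--             return b
--         return cache[j]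
--
--     for i in range(2, n + 1):
--         if cache[i] is None:
--             cache[i] = g(i - 1) ** 2 + g(i - 2)
--     return cache[n]
-- ===== Notes on version B (the rewrite author's own statement) =====
-- stated objective: alternative
-- what changed: Replaces the top-down memoized recursion with a single bottom-up loop that fills the same list-backed cache forward from index 2 to n.
-- outside the precondition, e.g. on _fib_modified(1, 2, -1, [2, 3, None]): A returns 11, B returns None
import Mathlib
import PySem

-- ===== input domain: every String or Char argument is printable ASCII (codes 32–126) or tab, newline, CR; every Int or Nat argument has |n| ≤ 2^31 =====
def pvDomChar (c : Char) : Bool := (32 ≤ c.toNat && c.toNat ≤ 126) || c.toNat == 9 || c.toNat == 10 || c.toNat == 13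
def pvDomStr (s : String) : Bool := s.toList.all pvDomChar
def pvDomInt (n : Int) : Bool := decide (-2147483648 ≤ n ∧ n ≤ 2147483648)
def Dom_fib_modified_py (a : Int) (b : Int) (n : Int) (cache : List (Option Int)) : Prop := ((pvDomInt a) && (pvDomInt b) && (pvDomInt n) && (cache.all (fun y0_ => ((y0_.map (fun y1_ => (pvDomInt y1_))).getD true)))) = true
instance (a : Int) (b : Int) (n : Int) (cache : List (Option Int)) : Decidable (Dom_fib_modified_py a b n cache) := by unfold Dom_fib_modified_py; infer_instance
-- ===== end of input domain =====

-- B replaces A's top-down memoized recursion by a bottom-up forward fill of the same cache list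
-- (alternative decomposition, same cost). Equivalence is about the RETURN value only: both Pythons
-- mutate `cache`, and on pre-filled caches they may fill different entries.


-- ===== PORT A =====
-- State-threading transliteration of A's memoized recursion: the mutated cache is passed along,
-- `none` marks an IndexError / missing return (excluded by Pre_). Fuel n.toNat+1 bounds the
-- recursion depth, which Python's recursion reaches only down to the base cases.
def fibA (a b : Int) : Nat → Int → List (Option Int) → Option (Int × List (Option Int))
  | 0, _, _ => none
  | fuel+1, n, c =>
    if n = 0 then some (a, c)
    else if n = 1 then some (b, c)
    else
      match PySem.List.pyGet? c n with
      | none => none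
      | some (some x) => some (x, c)
      | some none =>
        match fibA a b fuel (n-1) c with
        | none => none
        | some (x, c1) =>
          match fibA a b fuel (n-2) c1 with
          | none => none
          | some (y, c2) =>
            let c3 := PySem.List.pySetD c2 n (some (x ^ 2 + y))
            match PySem.List.pyGet? c3 n with
            | some (some z) => some (z, c3)
            | _ => none

def fib_modified_py (a : Int) (b : Int) (n : Int) (cache : List (Option Int)) : Int :=
  match fibA a b (n.toNat + 1) n cache with
  | some (v, _) => v
  | none => 0

-- ===== PORT B =====
-- the inner accessor g of Source B
def gB (a b : Int) (c : List (Option Int)) (j : Int) : Int :=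
  if j = 0 then a
  else if j = 1 then b
  else match PySem.List.pyGet? c j with
    | some (some x) => x
    | _ => 0   -- IndexError / None read: unreachable inside Pre_

-- the body of Source B's for-loop: fill cache[i] if it is still None
def stepB (a b : Int) (c : List (Option Int)) (i : Int) : List (Option Int) :=
  match PySem.List.pyGet? c i with
  | some none =>
      PySem.List.pySetD c i (some (gB a b c (i-1) ^ 2 + gB a b c (i-2)))
  | _ => c

def fib_modified_py_alt (a : Int) (b : Int) (n : Int) (cache : List (Option Int)) : Int :=
  if n = 0 then a
  else if n = 1 then b
  else
    match PySem.List.pyGet?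
      ((PySem.List.pyRange 2 (n+1) 1).foldl (stepB a b) cache) n with
    | some (some x) => x
    | _ => 0   -- IndexError / None read: unreachable inside Pre_

-- ===== PRECONDITION & SPEC =====
-- Pre_ excludes inputs where A raises (IndexError: n ≥ 2 with len(cache) ≤ n, or a negative n
-- whose recursion runs off the front of the cache) and the negative-n inputs where cache[n] wraps
-- to a None entry, on which A may still return a recursively computed value while B returns
-- None (not an int). Negative n whose wrapped entry is filled IS inside Pre_ (both return it).
def Pre_fib_modified_py (a : Int) (b : Int) (n : Int) (cache : List (Option Int)) : Prop :=
  (0 ≤ n ∧ (n ≤ 1 ∨ n < cache.length)) ∨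
  (n < 0 ∧ ((PySem.List.pyGet? cache n).getD none).isSome = true)
instance (a : Int) (b : Int) (n : Int) (cache : List (Option Int)) : Decidable (Pre_fib_modified_py a b n cache) := by unfold Pre_fib_modified_py; infer_instance

def pvWitness_fib_modified_py : Int × Int × Int × List (Option Int) := (0, 1, 4, [none, none, none, none, none])

def Spec_fib_modified_py (a : Int) (b : Int) (n : Int) (cache : List (Option Int)) (out : Int) : Prop := out = fib_modified_py_alt a b n cache
instance (a : Int) (b : Int) (n : Int) (cache : List (Option Int)) (out : Int) : Decidable (Spec_fib_modified_py a b n cache out) := by unfold Spec_fib_modified_py; infer_instance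

-- ===== CLAIM (what is proved, stated in full; the proofs are below) =====
def Claim_equal_fib_modified_py : Prop := ∀ (a : Int) (b : Int) (n : Int) (cache : List (Option Int)), Dom_fib_modified_py a b n cache → Pre_fib_modified_py a b n cache → Spec_fib_modified_py a b n cache (fib_modified_py a b n cache)

-- ===== LEMMAS AND PROOFS =====

-- The mathematical value both programs compute: V j, reading pre-filled entries of the ORIGINAL cache.
def Vfn (a b : Int) (cache : List (Option Int)) : Nat → Int
  | 0 => a
  | 1 => b
  | (j+2) => match cache.getD (j+2) none with
    | some x => x
    | none => (Vfn a b cache (j+1)) ^ 2 + Vfn a b cache j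

-- cache states reachable by A: each entry is still original or holds its V value
def InvA (a b : Int) (cache c : List (Option Int)) : Prop :=
  c.length = cache.length ∧
  ∀ j : Nat, c.getD j none = cache.getD j none ∨ c.getD j none = some (Vfn a b cache j)

theorem invA_refl (a b : Int) (cache : List (Option Int)) : InvA a b cache cache :=
  ⟨rfl, fun _ => Or.inl rfl⟩

theorem getD_set_ite (c : List (Option Int)) (i j : Nat) (v : Option Int) (hi : i < c.length) :
    (c.set i v).getD j none = if j = i then v else c.getD j none := by
  by_cases h : j = i
  · subst h; simp [List.getD_eq_getElem?_getD, hi]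
  · simp [h, List.getD_eq_getElem?_getD, List.getElem?_set_ne (fun e => h e.symm)]

theorem pyGet?_getD (c : List (Option Int)) (j : Nat) (hj : j < c.length) :
    PySem.List.pyGet? c (j : Int) = some (c.getD j none) := by
  simp [PySem.List.pyGet?_natCast, List.getElem?_eq_getElem hj, List.getD_eq_getElem?_getD]

theorem fibA_correct (a b : Int) (cache : List (Option Int)) :
    ∀ (fuel : Nat) (m : Nat) (c : List (Option Int)), InvA a b cache c →
    (m ≤ 1 ∨ m < cache.length) → m < fuel →
    ∃ c', fibA a b fuel (m : Int) c = some (Vfn a b cache m, c') ∧ InvA a b cache c' := by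
  intro fuel
  induction fuel with
  | zero => intro m c _ _ h; omega
  | succ fuel ih =>
    intro m c hinv hm hfuel
    match m, hm with
    | 0, _ => exact ⟨c, by simp [fibA, Vfn], hinv⟩
    | 1, _ => exact ⟨c, by simp [fibA, Vfn], hinv⟩
    | (k+2), hm =>
      have hlen : k + 2 < cache.length := by rcases hm with h | h <;> omega
      have hclen : k + 2 < c.length := by rw [hinv.1]; exact hlen
      have e1 : ¬ ((k+2 : Nat) : Int) = 0 := by push_cast; omega
      have e2 : ¬ ((k+2 : Nat) : Int) = 1 := by push_cast; omega
      simp only [fibA, if_neg e1, if_neg e2, pyGet?_getD c (k+2) hclen]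
      rcases hcv : c.getD (k+2) none with _ | x
      · -- cache entry still empty: A recurses and fills it
        have hcache : cache.getD (k+2) none = none := by
          rcases hinv.2 (k+2) with h | h
          · rw [← h, hcv]
          · rw [hcv] at h; exact absurd h (by simp)
        obtain ⟨c1, h1, hinv1⟩ := ih (k+1) c hinv (Or.inr (by omega)) (by omega)
        obtain ⟨c2, h2, hinv2⟩ := ih k c1 hinv1 (Or.inr (by omega)) (by omega)
        have cast1 : ((k+2:Nat):Int) - 1 = ((k+1:Nat):Int) := by push_cast; ring
        have cast2 : ((k+2:Nat):Int) - 2 = ((k:Nat):Int) := by push_cast; ring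
        have hc2len : k + 2 < c2.length := by rw [hinv2.1]; exact hlen
        have hcache' : cache[k+2]?.getD none = none := by
          rw [← List.getD_eq_getElem?_getD]; exact hcache
        have hV : Vfn a b cache (k+2) = (Vfn a b cache (k+1)) ^ 2 + Vfn a b cache k := by
          simp [Vfn, hcache']
        refine ⟨c2.set (k+2) (some (Vfn a b cache (k+2))), ?_, ?_, ?_⟩
        · simp only [cast1, cast2, h1, h2, PySem.List.pySetD_natCast]
          rw [pyGet?_getD _ (k+2) (by simpa using hc2len), getD_set_ite _ _ _ _ hc2len]
          simp [hV]
        · simp [hinv2.1]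
        · intro j
          rw [getD_set_ite _ _ _ _ hc2len]
          by_cases hj : j = k + 2
          · simp [hj]
          · simp only [if_neg hj]; exact hinv2.2 j
      · -- cache hit: the stored value is V (k+2)
        have hx : x = Vfn a b cache (k+2) := by
          rcases hinv.2 (k+2) with h | h
          · rw [hcv] at h
            have h' : cache[k+2]?.getD none = some x := by
              rw [← List.getD_eq_getElem?_getD]; exact h.symm
            simp [Vfn, h']
          · rw [hcv] at h; exact Option.some.inj h
        exact ⟨c, by simp [hx], hinv⟩

-- cache states of B's forward fill: indices 2..i-1 hold their V value, the rest is untouched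
def QB (a b : Int) (cache : List (Option Int)) (i : Nat) (c : List (Option Int)) : Prop :=
  c.length = cache.length ∧
  (∀ j : Nat, 2 ≤ j → j < i → c.getD j none = some (Vfn a b cache j)) ∧
  (∀ j : Nat, i ≤ j → c.getD j none = cache.getD j none)

theorem foldB (a b : Int) (cache : List (Option Int)) (N : Nat) (hN : N < cache.length) :
    ∀ (d i : Nat) (iz : Int) (c : List (Option Int)), 2 ≤ i → iz = (i : Int) → i + d = N + 1 → QB a b cache i c →
    QB a b cache (N+1) ((PySem.List.pyRange iz ((N:Int)+1) 1).foldl (stepB a b) c) := by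
  intro d
  induction d with
  | zero =>
    intro i iz c h2 hiz hid hq
    have hi : iz = (N:Int)+1 := by rw [hiz]; push_cast; omega
    rw [hi, PySem.List.pyRange_one_eq_nil (le_refl _), List.foldl_nil]
    have : i = N + 1 := by omega
    rw [this] at hq; exact hq
  | succ d ihd =>
    intro i iz c h2 hiz hid hq
    obtain ⟨k, rfl⟩ : ∃ k, i = k + 2 := ⟨i - 2, by omega⟩
    have hiN : iz < (N:Int)+1 := by rw [hiz]; push_cast; omega
    rw [PySem.List.pyRange_one_cons hiN, List.foldl_cons, hiz,
        show ((k+2:Nat):Int)+1 = ((k+3:Nat):Int) by push_cast; ring]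
    apply ihd (k+3) ((k+3:Nat):Int) _ (by omega) rfl (by omega)
    unfold stepB
    have hclen : k + 2 < c.length := by rw [hq.1]; omega
    rw [pyGet?_getD c (k+2) hclen, hq.2.2 (k+2) (le_refl _)]
    -- the values B's accessor g reads were already filled in (or are the bases)
    have hg : ∀ j : Nat, j < k + 2 → gB a b c (j : Int) = Vfn a b cache j := by
      intro j hj
      match j with
      | 0 => simp [gB, Vfn]
      | 1 => simp [gB, Vfn]
      | (t+2) =>
        have hcj : c.getD (t+2) none = some (Vfn a b cache (t+2)) :=
          hq.2.1 (t+2) (by omega) hj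
        have hjlen : t + 2 < c.length := by rw [hq.1]; omega
        simp only [gB]
        rw [if_neg (by push_cast; omega), if_neg (by push_cast; omega),
            pyGet?_getD c (t+2) hjlen, hcj]
    rcases hco : cache.getD (k+2) none with _ | x
    · -- original entry empty: loop fills it with V (k+2)
      have hVk2 : Vfn a b cache (k+2) = (Vfn a b cache (k+1)) ^ 2 + Vfn a b cache k := by
        have hco' : cache[k+2]?.getD none = none := by
          rw [← List.getD_eq_getElem?_getD]; exact hco
        simp [Vfn, hco']
      have hval : gB a b c (((k+2:Nat):Int) - 1) ^ 2 + gB a b c (((k+2:Nat):Int) - 2)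
          = Vfn a b cache (k+2) := by
        rw [show ((k+2:Nat):Int) - 1 = ((k+1:Nat):Int) by push_cast; ring,
            show ((k+2:Nat):Int) - 2 = ((k:Nat):Int) by push_cast; ring,
            hg (k+1) (by omega), hg k (by omega), hVk2]
      simp only [hval, PySem.List.pySetD_natCast]
      refine ⟨by simp [hq.1], ?_, ?_⟩
      · intro j hj2 hj3
        rw [getD_set_ite _ _ _ _ hclen]
        by_cases hje : j = k + 2
        · simp [hje]
        · rw [if_neg hje]; exact hq.2.1 j hj2 (by omega)
      · intro j hj3
        rw [getD_set_ite _ _ _ _ hclen, if_neg (by omega)]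
        exact hq.2.2 j (by omega)
    · -- original entry pre-filled: loop skips it, and its value IS V (k+2)
      have hx : x = Vfn a b cache (k+2) := by
        have hco' : cache[k+2]?.getD none = some x := by
          rw [← List.getD_eq_getElem?_getD]; exact hco
        simp [Vfn, hco']
      refine ⟨hq.1, ?_, ?_⟩
      · intro j hj2 hj3
        by_cases hje : j = k + 2
        · rw [hje, hq.2.2 (k+2) (le_refl _), hco, hx]
        · exact hq.2.1 j hj2 (by omega)
      · intro j hj3
        exact hq.2.2 j (by omega)

theorem fibB_correct (a b : Int) (cache : List (Option Int)) (n : Int)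
    (h0 : 2 ≤ n) (hlen : n < cache.length) :
    fib_modified_py_alt a b n cache = Vfn a b cache n.toNat := by
  obtain ⟨N, rfl⟩ : ∃ N : Nat, n = (N : Int) :=
    ⟨n.toNat, (Int.toNat_of_nonneg (by omega)).symm⟩
  have h2N : 2 ≤ N := by exact_mod_cast h0
  have hNlen : N < cache.length := by exact_mod_cast hlen
  have hq0 : QB a b cache 2 cache := ⟨rfl, fun j hj hji => by omega, fun j _ => rfl⟩
  have hq := foldB a b cache N hNlen (N-1) 2 (2 : Int) cache (le_refl 2) (by norm_num) (by omega) hq0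
  unfold fib_modified_py_alt
  rw [if_neg (by push_cast; omega), if_neg (by push_cast; omega)]
  rw [pyGet?_getD _ N (by rw [hq.1]; exact hNlen), hq.2.1 N h2N (by omega)]
  simp

-- ===== VERDICT (by name: the statement is the Claim_ definition above) =====
theorem fib_modified_py_spec : Claim_equal_fib_modified_py := by
  intro a b n cache _ hpre
  unfold Spec_fib_modified_py
  rcases hpre with ⟨hn0, hcase⟩ | ⟨hneg, hsome⟩
  case inr =>
    -- negative n, wrapped entry pre-filled: both return it without touching anything
    obtain ⟨x, hx⟩ : ∃ x, PySem.List.pyGet? cache n = some (some x) := by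
      cases h : PySem.List.pyGet? cache n with
      | none => rw [h] at hsome; simp at hsome
      | some o =>
        cases o with
        | none => rw [h] at hsome; simp at hsome
        | some x => exact ⟨x, rfl⟩
    have ht : n.toNat = 0 := by omega
    have e1 : ¬ n = 0 := by omega
    have e2 : ¬ n = 1 := by omega
    unfold fib_modified_py fib_modified_py_alt
    rw [ht]
    simp only [fibA, if_neg e1, if_neg e2, hx,
      PySem.List.pyRange_one_eq_nil (show n + 1 ≤ 2 by omega), List.foldl_nil]
  by_cases h2 : n ≤ 1
  · -- base cases
    interval_cases n <;> simp [fib_modified_py, fib_modified_py_alt, fibA]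
  · push Not at h2
    have hlen : n < cache.length := by
      rcases hcase with h | h
      · omega
      · exact h
    have hmn : (n.toNat : Int) = n := Int.toNat_of_nonneg hn0
    obtain ⟨c', hA, _⟩ := fibA_correct a b cache (n.toNat + 1) n.toNat cache
      (invA_refl a b cache) (Or.inr (by omega)) (by omega)
    have : fib_modified_py a b n cache = Vfn a b cache n.toNat := by
      unfold fib_modified_py
      rw [hmn] at hA
      rw [hA]
    rw [this, fibB_correct a b cache n (by omega) hlen]
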